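-- pv_equiv track=rewrite | github.com/mehrdadkh73/CS-111-Python | Xiaofan_WU_ps04_programs/wordlistOps.py | wordLengthFrequencies
-- ===== SOURCE A (Python) =====
-- def wordLengthFrequencies(mylist):
--     # determine the length of longest word
--     lengthOfLongest = -1
--     for w in mylist:
--         if len(w) > lengthOfLongest:
--             lengthOfLongest = len(w)
--
--     # add pairs of length and num of words of that length to the result list
--     result = []
--     for n in range(1,lengthOfLongest+1):
--         count = 0
--         for w in mylist:
--             if len(w) == n:
--                 count = count + 1
--         result.append((n, count))
--     return result
-- ===== SOURCE B (Python) =====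
-- def wordLengthFrequencies(mylist):
--     # sort the word lengths once, then a single merge/grouping pass over them
--     lengths = sorted(len(w) for w in mylist)
--     maxlen = lengths[-1] if lengths else 0
--     i = 0
--     # words of length 0 are never reported; skip them
--     while i < len(lengths) and lengths[i] == 0:
--         i += 1
--     result = []
--     for n in range(1, maxlen + 1):
--         count = 0
--         while i < len(lengths) and lengths[i] == n:
--             count += 1
--             i += 1
--         result.append((n, count))
--     return result
-- ===== Notes on version B (the rewrite author's own statement) =====
-- stated objective: alternative
-- what changed: Instead of re-scanning the whole word list once per length value 1..max, B sorts the word lengths once and emits all (length, count) pairs in a single merge/grouping pass over the sorted lengths.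
import Mathlib
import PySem

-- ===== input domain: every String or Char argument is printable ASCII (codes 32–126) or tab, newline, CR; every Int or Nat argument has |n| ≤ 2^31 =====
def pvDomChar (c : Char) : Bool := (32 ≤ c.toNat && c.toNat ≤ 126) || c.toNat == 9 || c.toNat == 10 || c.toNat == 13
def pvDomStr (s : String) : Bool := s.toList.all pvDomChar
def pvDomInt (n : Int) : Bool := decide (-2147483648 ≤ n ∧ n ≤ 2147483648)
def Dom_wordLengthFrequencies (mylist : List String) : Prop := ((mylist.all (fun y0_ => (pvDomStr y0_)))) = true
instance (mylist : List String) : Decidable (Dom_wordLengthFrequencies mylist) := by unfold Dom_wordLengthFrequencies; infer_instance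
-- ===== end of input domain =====

-- B replaces A's rescan of the whole list for every length 1..max by one sort of the
-- word lengths followed by a single grouping pass (objective: alternative algorithm).

-- ===== PORT A =====
def wordLengthFrequencies (mylist : List String) : List (Int × Int) :=
  let lengthOfLongest : Int :=
    mylist.foldl (fun acc w => if PySem.Str.len w > acc then PySem.Str.len w else acc) (-1)
  (PySem.List.pyRange 1 (lengthOfLongest + 1) 1).foldl
    (fun result n =>
      let count : Int :=
        mylist.foldl (fun c w => if PySem.Str.len w == n then c + 1 else c) 0
      result ++ [(n, count)]) []

-- ===== PORT B =====
-- the inner 'while lengths[i] == n: count += 1; i += 1' pointer loop of Source B: returns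
-- (number of consumed entries, remaining suffix); exact since the pointer only moves forward
def consumeEq (n : Int) : List Int → Int × List Int
  | [] => (0, [])
  | x :: xs => if x == n then let p := consumeEq n xs; (p.1 + 1, p.2) else (0, x :: xs)

def wordLengthFrequencies_alt (mylist : List String) : List (Int × Int) :=
  let lengths := PySem.List.sorted (mylist.map PySem.Str.len) (fun x => x) false
  let maxlen : Int := lengths.getLast?.getD 0
  -- the 'while lengths[i] == 0: i += 1' skip loop of Source B, as dropWhile (exact)
  let ls := lengths.dropWhile (fun x => x == 0)
  ((PySem.List.pyRange 1 (maxlen + 1) 1).foldl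
    (fun st n =>
      let p := consumeEq n st.1
      (p.2, st.2 ++ [(n, p.1)])) (ls, [])).2

-- ===== PRECONDITION & SPEC =====
def Spec_wordLengthFrequencies (mylist : List String) (out : List (Int × Int)) : Prop := out = wordLengthFrequencies_alt mylist
instance (mylist : List String) (out : List (Int × Int)) : Decidable (Spec_wordLengthFrequencies mylist out) := by unfold Spec_wordLengthFrequencies; infer_instance

-- ===== CLAIM (what is proved, stated in full; the proofs are below) =====
def Claim_equal_wordLengthFrequencies : Prop := ∀ (mylist : List String), Dom_wordLengthFrequencies mylist → Spec_wordLengthFrequencies mylist (wordLengthFrequencies mylist)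

-- ===== LEMMAS AND PROOFS =====

-- A's max-tracking fold is foldl max
theorem foldl_ifmax_eq_foldl_max (l : List Int) (a : Int) :
    l.foldl (fun acc x => if x > acc then x else acc) a = l.foldl max a := by
  induction l generalizing a with
  | nil => rfl
  | cons x xs ih =>
      simp only [List.foldl_cons, ih]
      congr 1
      simp only [max_def]
      split_ifs <;> omega

-- foldl max over a nonempty ≤-sorted list is max with its last element
theorem foldl_max_sorted : ∀ (l : List Int), l.Pairwise (· ≤ ·) → ∀ (h : l ≠ []) (a : Int),
    l.foldl max a = max a (l.getLast h) := by
  intro l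
  induction l with
  | nil => intro _ h; exact absurd rfl h
  | cons x xs ih =>
      intro hp h a
      rcases List.pairwise_cons.mp hp with ⟨hx, hxs⟩
      cases xs with
      | nil => simp
      | cons y ys =>
          have hne : (y :: ys) ≠ [] := by simp
          rw [List.foldl_cons, ih hxs hne (max a x)]
          have hlm : x ≤ (y :: ys).getLast hne := hx _ (List.getLast_mem hne)
          rw [List.getLast_cons hne]
          simp only [max_def]
          split_ifs <;> omega

-- counting fold over the word list counts in the length list
theorem count_fold_eq (mylist : List String) (n : Int) :
    mylist.foldl (fun c w => if PySem.Str.len w == n then c + 1 else c) 0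
      = ((mylist.map PySem.Str.len).count n : Int) := by
  have h := PySem.List.foldl_count_if (fun w => PySem.Str.len w == n) mylist 0
  simpa [List.count, List.countP_map, Function.comp] using h

-- consumeEq is takeWhile-length / dropWhile
theorem consumeEq_eq (n : Int) (ls : List Int) :
    consumeEq n ls = (((ls.takeWhile (fun x => x == n)).length : Int), ls.dropWhile (fun x => x == n)) := by
  induction ls with
  | nil => rfl
  | cons x xs ih =>
      by_cases h : x = n
      · simp [consumeEq, h, ih]
      · have hb : (x == n) = false := by simpa using h
        simp [consumeEq, hb]

-- in a sorted list bounded below by n, the n-prefix length is the count of n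
theorem takeWhile_len_eq_count (n : Int) (ls : List Int)
    (hp : ls.Pairwise (· ≤ ·)) (hb : ∀ x ∈ ls, n ≤ x) :
    (ls.takeWhile (fun x => x == n)).length = ls.count n := by
  induction ls with
  | nil => rfl
  | cons x xs ih =>
      rcases List.pairwise_cons.mp hp with ⟨hx, hxs⟩
      by_cases h : x = n
      · subst h
        simp [ih hxs (fun y hy => hb y (List.mem_cons_of_mem _ hy))]
      · have hb' : (x == n) = false := by simpa using h
        have hxn : n < x := lt_of_le_of_ne (hb x (List.mem_cons_self)) (fun e => h e.symm)
        have hz : (x :: xs).count n = 0 := by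
          rw [List.count_eq_zero]
          intro hmem
          rcases List.mem_cons.mp hmem with rfl | hmem
          · omega
          · have := hx n hmem; omega
        simp [hb', hz]

-- dropping the n-prefix of a sorted list bounded below by n leaves a list bounded below by n+1
theorem dropWhile_lb (n : Int) (ls : List Int)
    (hp : ls.Pairwise (· ≤ ·)) (hb : ∀ x ∈ ls, n ≤ x) :
    ∀ x ∈ ls.dropWhile (fun x => x == n), n + 1 ≤ x := by
  induction ls with
  | nil => intro x hx; simp at hx
  | cons x xs ih =>
      rcases List.pairwise_cons.mp hp with ⟨hx, hxs⟩
      by_cases h : x = n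
      · subst h
        simpa [List.dropWhile_cons] using ih hxs (fun y hy => hb y (List.mem_cons_of_mem _ hy))
      · have hb' : (x == n) = false := by simpa using h
        have hxn : n < x := lt_of_le_of_ne (hb x (List.mem_cons_self)) (fun e => h e.symm)
        intro y hy
        rw [List.dropWhile_cons, hb'] at hy
        simp at hy
        rcases hy with rfl | hy
        · omega
        · have := hx y hy; omega

-- dropping the n-prefix does not change counts of values other than n
theorem count_dropWhile (n m : Int) (hnm : n ≠ m) (ls : List Int) :
    (ls.dropWhile (fun x => x == n)).count m = ls.count m := by
  conv_rhs => rw [← List.takeWhile_append_dropWhile (p := fun x => x == n) (l := ls)]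
  rw [List.count_append]
  have hz : (ls.takeWhile (fun x => x == n)).count m = 0 := by
    rw [List.count_eq_zero]
    intro hmem
    have := List.mem_takeWhile_imp hmem
    simp at this
    exact hnm this.symm
  omega

-- the grouping pass of B, over a sorted suffix bounded below by n, emits the counts
theorem B_loop (k : Nat) : ∀ (n : Int) (ls : List Int) (acc : List (Int × Int)),
    ls.Pairwise (· ≤ ·) → (∀ x ∈ ls, n ≤ x) →
    ((PySem.List.pyRange n (n + k) 1).foldl
      (fun st m => let p := consumeEq m st.1; (p.2, st.2 ++ [(m, p.1)])) (ls, acc)).2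
    = acc ++ (PySem.List.pyRange n (n + k) 1).map (fun m => (m, (ls.count m : Int))) := by
  induction k with
  | zero =>
      intro n ls acc _ _
      rw [PySem.List.pyRange_one_eq_nil (by omega)]
      simp
  | succ k ih =>
      intro n ls acc hp hb
      have hcons : PySem.List.pyRange n (n + (k + 1 : Nat)) 1
          = n :: PySem.List.pyRange (n + 1) (n + (k + 1 : Nat)) 1 :=
        PySem.List.pyRange_one_cons (by push_cast; omega)
      rw [hcons]
      simp only [List.foldl_cons, List.map_cons]
      rw [consumeEq_eq]
      have hp' : (ls.dropWhile (fun x => x == n)).Pairwise (· ≤ ·) :=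
        hp.sublist (List.dropWhile_sublist _)
      have hb' := dropWhile_lb n ls hp hb
      have hrange : PySem.List.pyRange (n + 1) (n + ((k : Nat) + 1 : Nat)) 1
          = PySem.List.pyRange (n + 1) ((n + 1) + (k : Nat)) 1 := by
        push_cast
        congr 1
        omega
      rw [show ((ls.takeWhile (fun x => x == n)).length : Int) = (ls.count n : Int) by
            rw [takeWhile_len_eq_count n ls hp hb]]
      rw [hrange]
      rw [ih (n + 1) (ls.dropWhile (fun x => x == n)) (acc ++ [(n, (ls.count n : Int))]) hp' hb']
      simp only [List.append_assoc, List.cons_append, List.nil_append]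
      congr 1
      congr 1
      apply List.map_congr_left
      intro m hm
      have hm' := (PySem.List.mem_pyRange_one).mp hm
      rw [count_dropWhile n m (by omega)]

-- word lengths are nonnegative
theorem len_nonneg (w : String) : (0:Int) ≤ PySem.Str.len w := by
  rw [PySem.Str.len_eq]
  positivity

-- ===== VERDICT (by name: the statement is the Claim_ definition above) =====
theorem wordLengthFrequencies_spec : Claim_equal_wordLengthFrequencies := by
  intro mylist _
  show wordLengthFrequencies mylist = wordLengthFrequencies_alt mylist
  -- abbreviate
  have hm : mylist.foldl (fun acc w => if PySem.Str.len w > acc then PySem.Str.len w else acc) (-1)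
      = (mylist.map PySem.Str.len).foldl max (-1) := by
    have h2 : (mylist.map PySem.Str.len).foldl (fun acc x => if x > acc then x else acc) (-1)
        = mylist.foldl (fun acc w => if PySem.Str.len w > acc then PySem.Str.len w else acc) (-1) := by
      rw [List.foldl_map]
    exact h2.symm.trans (foldl_ifmax_eq_foldl_max _ _)
  have hA : wordLengthFrequencies mylist
      = (PySem.List.pyRange 1 ((mylist.map PySem.Str.len).foldl max (-1) + 1) 1).map
          (fun n => (n, ((mylist.map PySem.Str.len).count n : Int))) := by
    unfold wordLengthFrequencies
    simp only [hm, count_fold_eq, PySem.List.foldl_append_singleton_eq_map, List.nil_append]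
  rw [hA]
  unfold wordLengthFrequencies_alt
  set wl := mylist.map PySem.Str.len with hwl
  set s := PySem.List.sorted wl (fun x => x) false with hs
  have hperm : s.Perm wl := PySem.List.sorted_perm wl (fun x => x) false
  have hpair : s.Pairwise (· ≤ ·) := by
    have := PySem.List.sorted_pairwise wl (fun x => x)
    simpa [← hs] using this
  have hnns : ∀ x ∈ s, (0:Int) ≤ x := by
    intro x hx
    rcases List.mem_map.mp (hperm.mem_iff.mp hx) with ⟨w, _, rfl⟩
    exact len_nonneg w
  have hmaxperm : wl.foldl max (-1) = s.foldl max (-1) :=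
    (List.Perm.foldl_eq (f := max) hperm (-1)).symm
  cases hse : s with
  | nil =>
      have hwlnil : wl = [] := by
        have := (PySem.List.sorted_eq_nil_iff wl (fun x => x) false).mp (by rw [← hs, hse])
        exact this
      rw [hmaxperm, hse]
      simp only [List.foldl_nil, List.getLast?_nil, Option.getD_none, List.dropWhile_nil]
      rw [PySem.List.pyRange_one_eq_nil (by omega), PySem.List.pyRange_one_eq_nil (by omega)]
      simp
  | cons x t =>
      have hne : s ≠ [] := by rw [hse]; simp
      have hM : s.foldl max (-1) = max (-1) (s.getLast hne) := foldl_max_sorted s hpair hne (-1)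
      have hMnn : (0:Int) ≤ s.getLast hne := hnns _ (List.getLast_mem hne)
      have hMval : s.foldl max (-1) = s.getLast hne := by rw [hM]; omega
      have hlast? : s.getLast? = some (s.getLast hne) := List.getLast?_eq_some_getLast hne
      rw [hmaxperm, hMval]
      simp only []
      rw [← hse, hlast?, Option.getD_some]
      -- apply the grouping-pass lemma with n = 1, k = (s.getLast hne).toNat
      have hlp : (s.dropWhile (fun x => x == 0)).Pairwise (· ≤ ·) :=
        hpair.sublist (List.dropWhile_sublist _)
      have hlb : ∀ x ∈ s.dropWhile (fun x => x == 0), (1:Int) ≤ x := by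
        intro x hx
        have := dropWhile_lb 0 s hpair hnns x hx
        omega
      have hbound : s.getLast hne + 1 = 1 + ((s.getLast hne).toNat : Nat) := by omega
      rw [hbound, B_loop _ 1 _ [] hlp hlb]
      simp only [List.nil_append]
      apply List.map_congr_left
      intro m hm
      have hm' := (PySem.List.mem_pyRange_one).mp hm
      rw [count_dropWhile 0 m (by omega), hperm.count_eq]
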